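-- pv_equiv track=rewrite | github.com/Piyush-Gambhir/codechef-contests-and-problem-solutions | Contests/NCU Hacks 1.0/Round 2/ONEVONE206.py | min_time_to_view
-- ===== SOURCE A (Python) =====
-- import heapq
--
-- def min_time_to_view(N, X, exhibits):
--     exhibits = [-ex for ex in exhibits]
--     heapq.heapify(exhibits)
--
--     time = 0
--     total_friends = X * N
--
--     while total_friends > 0:
--         remaining_friends = X
--         current_round_exhibits = []
--
--         while remaining_friends > 0 and exhibits:
--             largest_exhibit = -heapq.heappop(exhibits)
--             if largest_exhibit <= 0:
--                 break
--
--             if remaining_friends >= largest_exhibit: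
--                 total_friends -= largest_exhibit
--                 remaining_friends -= largest_exhibit
--             else:
--                 total_friends -= remaining_friends
--                 largest_exhibit -= remaining_friends
--                 remaining_friends = 0
--
--             current_round_exhibits.append(-largest_exhibit)
--
--         for cap in current_round_exhibits:
--             heapq.heappush(exhibits, cap)
--
--         time += 1
--
--     return time
-- ===== SOURCE B (Python) =====
-- def min_time_to_view(N, X, exhibits):
--     # Run-length encoded multiset of the positive capacities, descending by value.
--     # A round never touches individual exhibits: whole runs are consumed at once and
--     # the single crossing exhibit is found with one divmod; once the capacity sum is
--     # <= X the remaining rounds are a single closed-form ceiling division.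
--     runs = []  # [value, count], values strictly descending
--     for e in sorted((x for x in exhibits if x > 0), reverse=True):
--         if runs and runs[-1][0] == e:
--             runs[-1][1] += 1
--         else:
--             runs.append([e, 1])
--     total = X * N
--     s = sum(v * m for v, m in runs)
--     time = 0
--     while total > 0:
--         if s <= X:
--             return time + -(-total // s)
--         rem = X
--         i = 0
--         while runs[i][0] * runs[i][1] <= rem:
--             rem -= runs[i][0] * runs[i][1]
--             i += 1
--         v, m = runs[i]
--         p = rem % v
--         c = v - p  # the crossing exhibit after this round (== v when p == 0)
--         if m == 1:
--             del runs[i]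
--         else:
--             runs[i][1] = m - 1
--         while i < len(runs) and runs[i][0] > c:
--             i += 1
--         if i < len(runs) and runs[i][0] == c:
--             runs[i][1] += 1
--         else:
--             runs.insert(i, [c, 1])
--         s -= p
--         total -= X
--         time += 1
--     return time
-- ===== Notes on version B (the rewrite author's own statement) =====
-- stated objective: alternative
-- what changed: B drops the heap simulation entirely: it keeps the positive capacities as a run-length encoded multiset (value,count) sorted descending, consumes whole runs per round with one divmod to locate and reduce the single crossing exhibit (never touching individual exhibits), and replaces the whole stationary tail of the simulation (capacity sum <= X) with one closed-form ceiling division.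
import Mathlib
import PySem

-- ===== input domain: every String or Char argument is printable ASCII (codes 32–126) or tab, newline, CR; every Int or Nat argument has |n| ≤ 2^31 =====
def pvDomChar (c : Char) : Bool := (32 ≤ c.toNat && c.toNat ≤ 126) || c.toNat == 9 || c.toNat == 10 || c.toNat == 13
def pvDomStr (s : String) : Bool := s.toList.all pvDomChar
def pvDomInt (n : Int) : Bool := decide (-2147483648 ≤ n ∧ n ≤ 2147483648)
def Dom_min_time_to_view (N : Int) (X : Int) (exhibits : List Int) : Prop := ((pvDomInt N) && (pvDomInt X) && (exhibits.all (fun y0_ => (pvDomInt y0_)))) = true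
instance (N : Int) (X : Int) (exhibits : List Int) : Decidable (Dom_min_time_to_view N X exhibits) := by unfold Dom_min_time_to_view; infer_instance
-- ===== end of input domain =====

-- B sorts the positive capacities once, simulates only the "shaping" rounds (capacity sum > X)
-- via a prefix-sum scan reducing the single crossing exhibit, and finishes with one ceiling
-- division once the per-round pattern is stationary; equal return value proved on Pre_.

-- ===== PORT A =====
-- heapq is modelled at the value level: heappop returns the minimum element of the
-- heap (first minimal occurrence) and the rest as a multiset; this is exact for A,
-- whose behaviour depends only on the multiset of heap values.
def popMin : List Int → Option (Int × List Int)
  | [] => none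
  | x :: xs =>
    match popMin xs with
    | none => some (x, [])
    | some (m, r) => if x ≤ m then some (x, xs) else some (m, x :: r)

theorem popMin_length : ∀ (h : List Int) (m : Int) (r : List Int),
    popMin h = some (m, r) → r.length < h.length := by
  intro h
  induction h with
  | nil => intro m r hc; simp [popMin] at hc
  | cons x xs ih =>
    intro m r hc
    simp only [popMin] at hc
    cases hx : popMin xs with
    | none =>
      rw [hx] at hc; cases hc; simp
    | some p =>
      rw [hx] at hc
      by_cases hle : x ≤ p.1
      · simp [hle] at hc; obtain ⟨_, h2⟩ := hc; subst h2; simp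
      · simp [hle] at hc
        obtain ⟨_, h2⟩ := hc; subst h2
        have := ih p.1 p.2 (by rw [hx])
        simpa using Nat.succ_lt_succ this

-- inner while-loop of A: (remaining_friends, heap, current_round_exhibits, total_friends)
def innerA (rem : Int) (heap : List Int) (acc : List Int) (total : Int) :
    List Int × List Int × Int :=
  if rem > 0 then
    match hp : popMin heap with
    | none => (heap, acc, total)
    | some (m, rest) =>
      let largest := -m
      if largest ≤ 0 then (rest, acc, total)
      else if rem ≥ largest then
        innerA (rem - largest) rest (acc ++ [-largest]) (total - largest)
      else (rest, acc ++ [-(largest - rem)], total - rem)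
  else (heap, acc, total)
termination_by heap.length
decreasing_by exact popMin_length heap m rest hp

-- outer while-loop of A; fuel is an upper bound on the number of rounds (total
-- decreases by at least 1 per round on every input admitted by Pre_)
def outerA (fuel : Nat) (X : Int) (heap : List Int) (total time : Int) : Int :=
  match fuel with
  | 0 => time
  | f + 1 =>
    if total > 0 then
      let s := innerA X heap [] total
      outerA f X (s.1 ++ s.2.1) s.2.2 (time + 1)
    else time

def min_time_to_view (N : Int) (X : Int) (exhibits : List Int) : Int :=
  outerA ((X * N).toNat + 1) X (exhibits.map (fun e => -e)) (X * N) 0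

-- ===== PORT B =====
-- building the run-length list from the sorted capacities (the append/increment loop)
def buildRuns : List Int → List (Int × Int)
  | [] => []
  | e :: es =>
    match buildRuns es with
    | [] => [(e, 1)]
    | (v, m) :: rest => if e = v then (e, m + 1) :: rest else (e, 1) :: (v, m) :: rest

-- the crossing scan `while runs[i][0] * runs[i][1] <= rem: ...`:
-- returns (runs served fully, leftover rem, crossing run, rest)
def crossR (rem : Int) : List (Int × Int) → List (Int × Int) × Int × (Int × Int) × List (Int × Int)
  | [] => ([], rem, (0, 0), [])
  | r :: rs =>
    if r.1 * r.2 ≤ rem then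
      let t := crossR (rem - r.1 * r.2) rs
      (r :: t.1, t.2)
    else ([], rem, r, rs)

-- the reinsertion scan: skip larger runs, merge into an equal run, else start a new run
def insRun (c : Int) : List (Int × Int) → List (Int × Int)
  | [] => [(c, 1)]
  | r :: rs =>
    if r.1 > c then r :: insRun c rs
    else if r.1 = c then (c, r.2 + 1) :: rs
    else (c, 1) :: r :: rs

-- the while-loop of B; fuel is an upper bound on the number of shaping rounds
-- (total decreases by X ≥ 1 per executed round on every input admitted by Pre_)
def outerR (fuel : Nat) (X : Int) (runs : List (Int × Int)) (s total time : Int) : Int :=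
  match fuel with
  | 0 => time
  | f + 1 =>
    if total > 0 then
      if s ≤ X then time + -(PySem.Int.floordiv (-total) s)
      else
        let t := crossR X runs
        let p := PySem.Int.mod t.2.1 t.2.2.1.1
        let c := t.2.2.1.1 - p
        let tail := if t.2.2.1.2 = 1 then t.2.2.2 else (t.2.2.1.1, t.2.2.1.2 - 1) :: t.2.2.2
        outerR f X (t.1 ++ insRun c tail) (s - p) (total - X) (time + 1)
    else time

def min_time_to_view_alt (N : Int) (X : Int) (exhibits : List Int) : Int :=
  let runs := buildRuns
    (PySem.List.sorted (exhibits.filter (fun e => decide (0 < e))) (fun x => x) true)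
  outerR ((X * N).toNat + 1) X runs ((runs.map (fun r => r.1 * r.2)).sum) (X * N) 0

-- ===== PRECONDITION & SPEC =====
-- Pre_ is exactly A's halting set: with X*N > 0, unless X ≥ 1 and some exhibit is
-- positive, no round ever reduces total_friends and A loops forever.
def Pre_min_time_to_view (N : Int) (X : Int) (exhibits : List Int) : Prop :=
  X * N ≤ 0 ∨ (0 < X ∧ ∃ e ∈ exhibits, 0 < e)
instance (N : Int) (X : Int) (exhibits : List Int) : Decidable (Pre_min_time_to_view N X exhibits) := by
  unfold Pre_min_time_to_view; infer_instance

def pvWitness_min_time_to_view : Int × Int × List Int := (3, 2, [5, 1])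

def Spec_min_time_to_view (N : Int) (X : Int) (exhibits : List Int) (out : Int) : Prop := out = min_time_to_view_alt N X exhibits
instance (N : Int) (X : Int) (exhibits : List Int) (out : Int) : Decidable (Spec_min_time_to_view N X exhibits out) := by unfold Spec_min_time_to_view; infer_instance

-- ===== CLAIM (what is proved, stated in full; the proofs are below) =====
def Claim_equal_min_time_to_view : Prop := ∀ (N : Int) (X : Int) (exhibits : List Int), Dom_min_time_to_view N X exhibits → Pre_min_time_to_view N X exhibits → Spec_min_time_to_view N X exhibits (min_time_to_view N X exhibits)

-- ===== LEMMAS AND PROOFS =====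

-- proof-side helpers: the element-level sorted-list simulation of A's round
def insertDesc (v : Int) : List Int → List Int
  | [] => [v]
  | c :: ks => if c ≥ v then c :: insertDesc v ks else v :: c :: ks

def crossB (rem : Int) : List Int → List Int × Int × Int × List Int
  | [] => ([], rem, 0, [])
  | c :: ks =>
    if c ≤ rem then
      let r := crossB (rem - c) ks
      (c :: r.1, r.2)
    else ([], rem, c, ks)

-- proof-side reference simulation: A's round on the sorted list of positive
-- capacities (pop head, fully served go to `served`, the crossing one re-inserted)
def roundL (rem : Int) (caps : List Int) (served : List Int) (total : Int) :
    List Int × List Int × Int :=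
  match caps with
  | [] => ([], served, total)
  | c :: ks =>
    if rem > 0 then
      if rem ≥ c then roundL (rem - c) ks (served ++ [c]) (total - c)
      else (insertDesc (c - rem) ks, served, total - rem)
    else (c :: ks, served, total)

def outerL (fuel : Nat) (X : Int) (caps : List Int) (total time : Int) : Int :=
  match fuel with
  | 0 => time
  | f + 1 =>
    if total > 0 then
      let s := roundL X caps [] total
      outerL f X (s.2.1 ++ s.1) s.2.2 (time + 1)
    else time

-- the positive exhibits stored in A's (negated) heap, as positive values
def posOf (h : List Int) : List Int :=
  (h.filter (fun e => decide (e < 0))).map (fun e => -e)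

theorem posOf_perm {h h' : List Int} (hp : h.Perm h') : (posOf h).Perm (posOf h') :=
  (hp.filter _).map _

theorem posOf_append (h h' : List Int) : posOf (h ++ h') = posOf h ++ posOf h' := by
  simp [posOf]

theorem posOf_cons_neg {m : Int} (hm : m < 0) (r : List Int) :
    posOf (m :: r) = -m :: posOf r := by
  simp [posOf, hm]

theorem posOf_cons_nonneg {m : Int} (hm : ¬ m < 0) (r : List Int) :
    posOf (m :: r) = posOf r := by
  simp [posOf, hm]

theorem posOf_pos {h : List Int} {v : Int} (hv : v ∈ posOf h) : 0 < v := by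
  simp only [posOf, List.mem_map, List.mem_filter] at hv
  obtain ⟨e, ⟨_, he⟩, rfl⟩ := hv
  simp at he; omega

theorem popMin_none : ∀ (h : List Int), popMin h = none → h = [] := by
  intro h
  cases h with
  | nil => intro; rfl
  | cons x xs =>
    intro hc; simp only [popMin] at hc
    cases hx : popMin xs with
    | none => rw [hx] at hc; simp at hc
    | some p => rw [hx] at hc; by_cases hle : x ≤ p.1 <;> simp [hle] at hc

theorem popMin_spec : ∀ (h : List Int) (m : Int) (r : List Int),
    popMin h = some (m, r) → h.Perm (m :: r) ∧ ∀ y ∈ h, m ≤ y := by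
  intro h
  induction h with
  | nil => intro m r hc; simp [popMin] at hc
  | cons x xs ih =>
    intro m r hc
    simp only [popMin] at hc
    cases hx : popMin xs with
    | none =>
      rw [hx] at hc
      have hxs : xs = [] := popMin_none xs hx
      subst hxs
      simp at hc
      obtain ⟨h1, h2⟩ := hc; subst h1; subst h2
      exact ⟨List.Perm.refl _, by intro y hy; simp at hy; omega⟩
    | some p =>
      rw [hx] at hc
      obtain ⟨hperm, hmin⟩ := ih p.1 p.2 (by rw [hx])
      by_cases hle : x ≤ p.1
      · simp [hle] at hc
        obtain ⟨h1, h2⟩ := hc; subst h1; subst h2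
        refine ⟨List.Perm.refl _, ?_⟩
        intro y hy
        rcases List.mem_cons.mp hy with rfl | hy
        · omega
        · exact le_trans hle (hmin y hy)
      · simp [hle] at hc
        obtain ⟨h1, h2⟩ := hc; subst h1; subst h2
        constructor
        · exact List.Perm.trans (hperm.cons x) (List.Perm.swap p.1 x p.2)
        · intro y hy
          rcases List.mem_cons.mp hy with rfl | hy
          · omega
          · exact hmin y hy

theorem insertDesc_perm (v : Int) (l : List Int) : (insertDesc v l).Perm (v :: l) := by
  induction l with
  | nil => simp [insertDesc]
  | cons c ks ih =>
    simp only [insertDesc]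
    by_cases h : c ≥ v
    · simp only [h, if_pos]
      exact List.Perm.trans (ih.cons c) (List.Perm.swap v c ks)
    · simp [h]

theorem insertDesc_pairwise {v : Int} {l : List Int} (hl : l.Pairwise (· ≥ ·)) :
    (insertDesc v l).Pairwise (· ≥ ·) := by
  induction l with
  | nil => simp [insertDesc]
  | cons c ks ih =>
    rcases List.pairwise_cons.mp hl with ⟨hc, hks⟩
    simp only [insertDesc]
    by_cases h : c ≥ v
    · simp only [h, if_pos]
      refine List.pairwise_cons.mpr ⟨?_, ih hks⟩
      intro b hb
      rcases List.mem_cons.mp ((insertDesc_perm v ks).mem_iff.mp hb) with rfl | hb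
      · exact h
      · exact hc b hb
    · simp only [h, if_false]
      refine List.pairwise_cons.mpr ⟨?_, hl⟩
      intro b hb
      rcases List.mem_cons.mp hb with rfl | hb
      · omega
      · exact le_trans (hc b hb) (by omega)

theorem mem_insertDesc {v b : Int} {l : List Int} (hb : b ∈ insertDesc v l) :
    b = v ∨ b ∈ l := List.mem_cons.mp ((insertDesc_perm v l).mem_iff.mp hb)

theorem innerA_not_pos {rem : Int} {heap acc : List Int} {total : Int} (hr : ¬ rem > 0) :
    innerA rem heap acc total = (heap, acc, total) := by
  rw [innerA, if_neg hr]

theorem innerA_none {rem : Int} {heap acc : List Int} {total : Int} (hr : rem > 0)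
    (hp : popMin heap = none) :
    innerA rem heap acc total = (heap, acc, total) := by
  rw [innerA, if_pos hr]
  split
  · rfl
  · next heq => rw [hp] at heq; cases heq

theorem innerA_step {rem : Int} {heap acc : List Int} {total m : Int} {rest : List Int}
    (hr : rem > 0) (hp : popMin heap = some (m, rest)) :
    innerA rem heap acc total =
      if -m ≤ 0 then (rest, acc, total)
      else if rem ≥ -m then innerA (rem - -m) rest (acc ++ [-(-m)]) (total - -m)
      else (rest, acc ++ [-(-m - rem)], total - rem) := by
  rw [innerA, if_pos hr]
  split
  · next heq => rw [hp] at heq; cases heq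
  · next m' rest' heq =>
    rw [hp] at heq
    cases heq
    rfl

theorem posOf_all_neg {l : List Int} (h : ∀ a ∈ l, a < 0) :
    posOf l = l.map (fun e => -e) := by
  unfold posOf
  rw [List.filter_eq_self.mpr (by intro a ha; simpa using h a ha)]

theorem posOf_eq_nil {l : List Int} (h : ∀ a ∈ l, ¬ a < 0) : posOf l = [] := by
  unfold posOf
  rw [List.filter_eq_nil_iff.mpr (by intro a ha; simpa using h a ha)]
  rfl

theorem mem_of_mem_posOf {l : List Int} {v : Int} (hv : v ∈ posOf l) : -v ∈ l := by
  simp only [posOf, List.mem_map, List.mem_filter] at hv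
  obtain ⟨e, ⟨he, _⟩, rfl⟩ := hv
  simpa using he

theorem neg_mem_posOf {l : List Int} {e : Int} (he : e ∈ l) (hneg : e < 0) :
    -e ∈ posOf l := by
  simp only [posOf, List.mem_map, List.mem_filter]
  exact ⟨e, ⟨he, by simpa using hneg⟩, rfl⟩

-- the inner-loop bisimulation: same total, and the recombined lists are related
theorem inner_sim : ∀ (caps : List Int) (rem : Int) (heap accA accB : List Int) (total : Int),
    caps.Perm (posOf heap) → caps.Pairwise (· ≥ ·) →
    accB = accA.map (fun e => -e) → (∀ a ∈ accA, a < 0) →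
    accB.Pairwise (· ≥ ·) → (∀ a ∈ accB, ∀ b ∈ caps, b ≤ a) →
    (innerA rem heap accA total).2.2 = (roundL rem caps accB total).2.2 ∧
    ((roundL rem caps accB total).2.1 ++ (roundL rem caps accB total).1).Perm
      (posOf ((innerA rem heap accA total).1 ++ (innerA rem heap accA total).2.1)) ∧
    ((roundL rem caps accB total).2.1 ++ (roundL rem caps accB total).1).Pairwise (· ≥ ·) := by
  intro caps
  induction caps with
  | nil =>
    intro rem heap accA accB total hperm hsort hmap hneg hsB hcross
    have hnil : posOf heap = [] := hperm.nil_eq.symm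
    have hnoneg : ∀ a ∈ heap, ¬ a < 0 := by
      intro a ha hlt
      have := neg_mem_posOf ha hlt
      rw [hnil] at this; simp at this
    have hBeq : roundL rem [] accB total = ([], accB, total) := by simp [roundL]
    rw [hBeq]
    by_cases hr : rem > 0
    · cases hp : popMin heap with
      | none =>
        rw [innerA_none hr hp]
        refine ⟨rfl, ?_, by simpa using hsB⟩
        rw [posOf_append, hnil, posOf_all_neg hneg, ← hmap]
        simp
      | some p =>
        obtain ⟨m, rest⟩ := p
        obtain ⟨hpm, hmin⟩ := popMin_spec heap m rest hp
        have hm0 : ¬ m < 0 := hnoneg m (hpm.mem_iff.mpr (by simp))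
        rw [innerA_step hr hp, if_pos (by omega : -m ≤ 0)]
        have hnoneg2 : ∀ a ∈ rest, ¬ a < 0 := fun a ha =>
          hnoneg a (hpm.mem_iff.mpr (by simp [ha]))
        refine ⟨rfl, ?_, by simpa using hsB⟩
        rw [posOf_append, posOf_eq_nil hnoneg2, posOf_all_neg hneg, ← hmap]
        simp
    · rw [innerA_not_pos hr]
      refine ⟨rfl, ?_, by simpa using hsB⟩
      rw [posOf_append, hnil, posOf_all_neg hneg, ← hmap]
      simp
  | cons c ks ih =>
    intro rem heap accA accB total hperm hsort hmap hneg hsB hcross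
    have hc_mem : c ∈ posOf heap := hperm.mem_iff.mp (by simp)
    have hcpos : 0 < c := posOf_pos hc_mem
    have hsort' := List.pairwise_cons.mp hsort
    by_cases hr : rem > 0
    · cases hp : popMin heap with
      | none =>
        exfalso
        have := popMin_none heap hp
        subst this
        simp [posOf] at hc_mem
      | some p =>
        obtain ⟨m, rest⟩ := p
        obtain ⟨hpm, hmin⟩ := popMin_spec heap m rest hp
        have h1 : m ≤ -c := hmin _ (by simpa using mem_of_mem_posOf hc_mem)
        have hp1neg : m < 0 := by omega
        have h2 : -m ≤ c := by
          have hmem : -m ∈ posOf heap :=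
            neg_mem_posOf (hpm.mem_iff.mpr (by simp)) hp1neg
          rcases List.mem_cons.mp (hperm.symm.mem_iff.mp hmem) with heq | hmem'
          · omega
          · exact hsort'.1 _ hmem'
        have hmc : m = -c := by omega
        subst hmc
        have hpos_rest : ks.Perm (posOf rest) := by
          have hstep : (c :: ks).Perm (c :: posOf rest) := by
            have h3 := (posOf_perm hpm)
            rw [posOf_cons_neg hp1neg] at h3
            simp only [neg_neg] at h3
            exact hperm.trans h3
          exact hstep.cons_inv
        rw [innerA_step hr hp, if_neg (by omega : ¬ -(-c) ≤ 0)]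
        by_cases hge : rem ≥ -(-c)
        · rw [if_pos hge]
          simp only [neg_neg] at hge ⊢
          have hBeq : roundL rem (c :: ks) accB total =
              roundL (rem - c) ks (accB ++ [c]) (total - c) := by
            simp [roundL, hr, hge]
          rw [hBeq]
          apply ih (rem - c) rest (accA ++ [-c]) (accB ++ [c]) (total - c) hpos_rest hsort'.2
          · simp [hmap]
          · intro a ha
            rcases List.mem_append.mp ha with ha | ha
            · exact hneg a ha
            · simp at ha; omega
          · rw [List.pairwise_append]
            refine ⟨hsB, by simp, ?_⟩
            intro a ha b hb
            simp at hb
            have := hcross a ha c (by simp)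
            omega
          · intro a ha b hb
            rcases List.mem_append.mp ha with ha | ha
            · exact hcross a ha b (by simp [hb])
            · simp at ha; subst ha
              exact hsort'.1 b hb
        · rw [if_neg hge]
          simp only [neg_neg] at hge ⊢
          have hBeq : roundL rem (c :: ks) accB total =
              (insertDesc (c - rem) ks, accB, total - rem) := by
            simp [roundL, hr, hge]
          rw [hBeq]
          refine ⟨rfl, ?_, ?_⟩
          · rw [posOf_append, posOf_append, posOf_all_neg hneg, ← hmap]
            have hone : posOf [-(c - rem)] = [c - rem] := by
              rw [posOf_cons_neg (by omega : -(c - rem) < 0)]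
              simp [posOf]
            rw [hone]
            have t1 : (accB ++ insertDesc (c - rem) ks).Perm
                ((c - rem) :: (posOf rest ++ accB)) :=
              (((insertDesc_perm (c - rem) ks).trans
                (hpos_rest.cons (c - rem))).append_left accB).trans
                List.perm_append_comm
            exact t1.trans ((List.perm_append_singleton _ _).symm.trans
              (List.Perm.of_eq (List.append_assoc _ _ _)))
          · rw [List.pairwise_append]
            refine ⟨hsB, insertDesc_pairwise hsort'.2, ?_⟩
            intro a ha b hb
            rcases mem_insertDesc hb with heq | hb
            · have := hcross a ha c (by simp); omega
            · exact hcross a ha b (by simp [hb])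
    · have hAeq : innerA rem heap accA total = (heap, accA, total) := innerA_not_pos hr
      have hBeq : roundL rem (c :: ks) accB total = (c :: ks, accB, total) := by
        simp [roundL, hr]
      rw [hAeq, hBeq]
      refine ⟨rfl, ?_, ?_⟩
      · rw [posOf_append, posOf_all_neg hneg, ← hmap]
        exact List.Perm.trans (hperm.append_left accB) (List.perm_append_comm)
      · rw [List.pairwise_append]
        exact ⟨hsB, hsort, fun a ha b hb => hcross a ha b hb⟩

-- the outer-loop bisimulation between A and the reference list simulation
theorem outer_sim : ∀ (fuel : Nat) (X : Int) (heap caps : List Int) (total time : Int),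
    caps.Perm (posOf heap) → caps.Pairwise (· ≥ ·) →
    outerA fuel X heap total time = outerL fuel X caps total time := by
  intro fuel
  induction fuel with
  | zero => intro X heap caps total time _ _; rfl
  | succ f ih =>
    intro X heap caps total time hperm hsort
    simp only [outerA, outerL]
    by_cases ht : total > 0
    · simp only [ht, if_pos]
      obtain ⟨h1, h2, h3⟩ := inner_sim caps X heap [] [] total hperm hsort (by simp)
        (by simp) (by simp) (by simp)
      rw [h1]
      exact ih X _ _ _ _ h2 h3
    · simp [ht]

theorem init_posOf (exhibits : List Int) :
    posOf (exhibits.map (fun e => -e)) = exhibits.filter (fun e => decide (0 < e)) := by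
  induction exhibits with
  | nil => rfl
  | cons x xs ih =>
    by_cases hx : 0 < x
    · simp only [List.map_cons, posOf_cons_neg (by omega : -x < 0)] at *
      simp [posOf] at ih ⊢
      simp [hx, ih]
    · simp only [List.map_cons]
      rw [posOf_cons_nonneg (by omega)]
      simp [posOf] at ih ⊢
      simp [hx, ih]

-- ===== equivalence of the reference simulation with B =====

theorem insertDesc_of_ge {v : Int} : ∀ {ks : List Int}, (∀ k ∈ ks, k ≤ v) →
    insertDesc v ks = v :: ks := by
  intro ks
  induction ks with
  | nil => intro; rfl
  | cons h t ih =>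
    intro hall
    by_cases hh : h ≥ v
    · have hv : h = v := le_antisymm (hall h (by simp)) hh
      subst hv
      simp only [insertDesc, if_pos (le_refl h)]
      rw [ih (fun k hk => hall k (by simp [hk]))]
    · simp [insertDesc, hh]

theorem insertDesc_sum (v : Int) (l : List Int) : (insertDesc v l).sum = v + l.sum :=
  (insertDesc_perm v l).sum_eq.trans (by simp)

theorem insertDesc_replicate {v c : Int} (hvc : v ≥ c) :
    ∀ (k : Nat) (rest : List Int),
    insertDesc c (List.replicate k v ++ rest) = List.replicate k v ++ insertDesc c rest := by
  intro k
  induction k with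
  | zero => intro rest; rfl
  | succ n ih =>
    intro rest
    simp only [List.replicate_succ, List.cons_append, insertDesc, if_pos hvc]
    rw [ih rest]

-- crossB decomposition: prefix + crossing element + rest, leftover friends 0 ≤ p < c
theorem roundL_full_serve : ∀ (caps : List Int) (rem : Int) (served : List Int) (total : Int),
    (∀ c ∈ caps, 0 < c) → caps.sum ≤ rem →
    roundL rem caps served total = ([], served ++ caps, total - caps.sum) := by
  intro caps
  induction caps with
  | nil => intro rem served total _ _; simp [roundL]
  | cons c ks ih =>
    intro rem served total hpos hs
    have hc : 0 < c := hpos c (by simp)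
    have hsum : 0 ≤ ks.sum := List.sum_nonneg (fun x hx => le_of_lt (hpos x (by simp [hx])))
    have hr : rem > 0 := by simp [List.sum_cons] at hs; omega
    have hge : rem ≥ c := by simp [List.sum_cons] at hs; omega
    simp only [roundL, if_pos hr, if_pos hge]
    rw [ih (rem - c) (served ++ [c]) (total - c) (fun x hx => hpos x (by simp [hx]))
      (by simp [List.sum_cons] at hs; omega)]
    simp [List.sum_cons]
    omega

-- a shaping round: the crossing element is reduced by the leftover, total drops by rem
theorem roundL_cross : ∀ (caps : List Int) (rem : Int) (served : List Int) (total : Int),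
    caps.Pairwise (· ≥ ·) → (∀ c ∈ caps, 0 < c) → 0 ≤ rem → rem < caps.sum →
    roundL rem caps served total =
      (insertDesc ((crossB rem caps).2.2.1 - (crossB rem caps).2.1) (crossB rem caps).2.2.2,
       served ++ (crossB rem caps).1, total - rem) := by
  intro caps
  induction caps with
  | nil => intro rem _ _ _ _ h0 hs; simp at hs; omega
  | cons c ks ih =>
    intro rem served total hsort hpos h0 hs
    have hsort' := List.pairwise_cons.mp hsort
    by_cases hc : c ≤ rem
    · have hr : rem > 0 := lt_of_lt_of_le (hpos c (by simp)) hc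
      simp only [crossB, if_pos hc, roundL, if_pos hr]
      rw [ih (rem - c) (served ++ [c]) (total - c) hsort'.2
        (fun x hx => hpos x (by simp [hx])) (by omega)
        (by simp [List.sum_cons] at hs; omega)]
      simp
    · simp only [crossB, if_neg hc]
      by_cases hr : rem > 0
      · simp [roundL, if_pos hr, if_neg (by omega : ¬ rem ≥ c)]
      · have hrem : rem = 0 := by omega
        subst hrem
        simp only [roundL, if_neg hr]
        rw [show c - (0:Int) = c by ring, insertDesc_of_ge hsort'.1]
        simp

theorem outerL_nonpos {fuel : Nat} {X : Int} {caps : List Int} {total time : Int}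
    (h : ¬ total > 0) : outerL fuel X caps total time = time := by
  cases fuel with
  | zero => rfl
  | succ f => simp [outerL, h]

-- the stationary tail: each remaining round serves the whole collection
theorem outerL_tail : ∀ (fuel : Nat) (X : Int) (caps : List Int) (total time : Int),
    (∀ c ∈ caps, 0 < c) → caps ≠ [] → caps.sum ≤ X → 0 < total → total ≤ (fuel : Int) →
    outerL fuel X caps total time = time + -(PySem.Int.floordiv (-total) caps.sum) := by
  intro fuel
  induction fuel with
  | zero => intro X caps total time _ _ _ h1 h2; simp at h2; omega
  | succ f ih =>
    intro X caps total time hpos hne hsX htot hfuel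
    have hssum : 0 < caps.sum := by
      cases caps with
      | nil => exact absurd rfl hne
      | cons c ks =>
        have := hpos c (by simp)
        have : 0 ≤ ks.sum := List.sum_nonneg (fun x hx => le_of_lt (hpos x (by simp [hx])))
        simp [List.sum_cons]; omega
    simp only [outerL, if_pos htot]
    rw [roundL_full_serve caps X [] total hpos hsX]
    simp only [List.nil_append, List.append_nil]
    by_cases hdone : total - caps.sum > 0
    · rw [ih X caps (total - caps.sum) (time + 1) hpos hne hsX hdone (by push_cast; omega)]
      have hgoal : -(PySem.Int.floordiv (-total) caps.sum) =
          1 + -(PySem.Int.floordiv (-(total - caps.sum)) caps.sum) := by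
        set q := -(PySem.Int.floordiv (-(total - caps.sum)) caps.sum) with hq
        have hb := (PySem.Int.neg_floordiv_neg_eq_iff_of_pos (a := total - caps.sum)
          (b := caps.sum) (q := q) hssum).mp hq.symm
        rw [PySem.Int.neg_floordiv_neg_eq_iff_of_pos hssum]
        constructor <;> nlinarith [hb.1, hb.2]
      omega
    · rw [outerL_nonpos hdone]
      have : -(PySem.Int.floordiv (-total) caps.sum) = 1 := by
        rw [PySem.Int.neg_floordiv_neg_eq_iff_of_pos hssum]
        constructor <;> nlinarith
      omega

-- ===== run-length representation =====

def dec : List (Int × Int) → List Int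
  | [] => []
  | r :: rs => List.replicate r.2.toNat r.1 ++ dec rs

-- well-formed run list: strictly descending positive values, counts ≥ 1
def Runs (rs : List (Int × Int)) : Prop :=
  rs.Pairwise (fun a b => a.1 > b.1) ∧ ∀ r ∈ rs, 0 < r.1 ∧ 1 ≤ r.2

theorem dec_append (a b : List (Int × Int)) : dec (a ++ b) = dec a ++ dec b := by
  induction a with
  | nil => rfl
  | cons r rs ih => simp [dec, ih]

theorem mem_dec {rs : List (Int × Int)} {x : Int} (hx : x ∈ dec rs) :
    ∃ r ∈ rs, r.1 = x := by
  induction rs with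
  | nil => simp [dec] at hx
  | cons r t ih =>
    simp only [dec, List.mem_append] at hx
    rcases hx with hx | hx
    · exact ⟨r, by simp, (List.eq_of_mem_replicate hx).symm⟩
    · obtain ⟨r', hr', he⟩ := ih hx
      exact ⟨r', by simp [hr'], he⟩

theorem dec_pos {rs : List (Int × Int)} (h : Runs rs) : ∀ x ∈ dec rs, 0 < x := by
  intro x hx
  obtain ⟨r, hr, he⟩ := mem_dec hx
  exact he ▸ (h.2 r hr).1

theorem dec_sorted {rs : List (Int × Int)} (h : Runs rs) :
    (dec rs).Pairwise (· ≥ ·) := by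
  induction rs with
  | nil => exact List.Pairwise.nil
  | cons r t ih =>
    have h2 := ih ⟨(List.pairwise_cons.mp h.1).2, fun x hx => h.2 x (by simp [hx])⟩
    simp only [dec]
    rw [List.pairwise_append]
    refine ⟨List.pairwise_replicate.mpr (Or.inr le_rfl), h2, ?_⟩
    intro a ha b hb
    have ha' := List.eq_of_mem_replicate ha
    obtain ⟨r', hr', he⟩ := mem_dec hb
    have := (List.pairwise_cons.mp h.1).1 r' hr'
    omega

theorem dec_sum (rs : List (Int × Int)) (h : ∀ r ∈ rs, 0 ≤ r.2) :
    (dec rs).sum = (rs.map (fun r => r.1 * r.2)).sum := by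
  induction rs with
  | nil => rfl
  | cons r t ih =>
    simp only [dec, List.sum_append, List.map_cons, List.sum_cons]
    rw [ih (fun x hx => h x (by simp [hx]))]
    have h2 : (0:Int) ≤ r.2 := h r (by simp)
    have : (List.replicate r.2.toNat r.1).sum = r.1 * r.2 := by
      rw [List.sum_replicate, nsmul_eq_mul]
      have : ((r.2.toNat : Nat) : Int) = r.2 := Int.toNat_of_nonneg h2
      rw [this]; ring
    rw [this]

-- ----- buildRuns -----

theorem buildRuns_eq_nil : ∀ {l : List Int}, buildRuns l = [] → l = [] := by
  intro l h
  cases l with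
  | nil => rfl
  | cons e es =>
    cases hb : buildRuns es with
    | nil => simp [buildRuns, hb] at h
    | cons r rest =>
      obtain ⟨v, m⟩ := r
      by_cases he : e = v <;> simp [buildRuns, hb, he] at h

theorem buildRuns_head_fst : ∀ {l : List Int} {r : Int × Int} {rs : List (Int × Int)},
    buildRuns l = r :: rs → ∃ es, l = r.1 :: es := by
  intro l r rs h
  cases l with
  | nil => simp [buildRuns] at h
  | cons e es =>
    refine ⟨es, ?_⟩
    cases hb : buildRuns es with
    | nil =>
      simp [buildRuns, hb] at h
      simp [← h.1]
    | cons r' rest =>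
      obtain ⟨v, m⟩ := r'
      by_cases he : e = v <;> simp [buildRuns, hb, he] at h <;> simp [← h.1, he]

theorem buildRuns_counts : ∀ (l : List Int) (r : Int × Int),
    r ∈ buildRuns l → 1 ≤ r.2 := by
  intro l
  induction l with
  | nil => intro r h; simp [buildRuns] at h
  | cons e es ih =>
    intro r h
    cases hb : buildRuns es with
    | nil =>
      simp [buildRuns, hb] at h
      simp [h]
    | cons r' rest =>
      obtain ⟨v, m⟩ := r'
      have hm : (1:Int) ≤ m := ih (v, m) (by rw [hb]; simp)
      by_cases he : e = v <;> simp only [buildRuns, hb, he, if_pos] at h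
      · simp at h
        rcases h with h | h
        · simp [h]; omega
        · exact ih _ (by rw [hb]; simp [h])
      · simp [he] at h
        rcases h with h | h | h
        · simp [h]
        · simp [h]; omega
        · exact ih _ (by rw [hb]; simp [h])

theorem dec_buildRuns : ∀ (l : List Int), dec (buildRuns l) = l := by
  intro l
  induction l with
  | nil => rfl
  | cons e es ih =>
    cases hb : buildRuns es with
    | nil =>
      have : es = [] := buildRuns_eq_nil hb
      subst this
      simp [buildRuns, dec]
    | cons r rest =>
      obtain ⟨v, m⟩ := r
      rw [hb] at ih
      have hm : (1:Int) ≤ m := buildRuns_counts es (v, m) (by rw [hb]; simp)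
      by_cases he : e = v
      · subst he
        simp only [buildRuns, hb, if_true]
        simp only [dec]
        rw [← ih]
        rw [show (m + 1).toNat = m.toNat + 1 by omega, List.replicate_succ]
        simp [dec]
      · simp only [buildRuns, hb, if_neg he, dec]
        rw [← ih]
        simp [dec]

theorem runs_buildRuns : ∀ {l : List Int}, l.Pairwise (· ≥ ·) → (∀ x ∈ l, 0 < x) →
    Runs (buildRuns l) := by
  intro l
  induction l with
  | nil => intro _ _; exact ⟨List.Pairwise.nil, by simp [buildRuns]⟩
  | cons e es ih =>
    intro hs hp
    have hs' := List.pairwise_cons.mp hs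
    obtain ⟨ih1, ih2⟩ := ih hs'.2 (fun x hx => hp x (by simp [hx]))
    have hepos : 0 < e := hp e (by simp)
    cases hb : buildRuns es with
    | nil => exact ⟨by simp [buildRuns, hb], by simp [buildRuns, hb, hepos]⟩
    | cons r rest =>
      obtain ⟨v, m⟩ := r
      rw [hb] at ih1 ih2
      have hm : (1:Int) ≤ m := (ih2 (v, m) (by simp)).2
      have hvpos : 0 < v := (ih2 (v, m) (by simp)).1
      have hev : v ≤ e := by
        obtain ⟨es', hes⟩ := buildRuns_head_fst hb
        exact hs'.1 v (by simp [hes])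
      by_cases he : e = v
      · subst he
        constructor
        · simp only [buildRuns, hb, if_true]
          refine List.pairwise_cons.mpr ⟨?_, (List.pairwise_cons.mp ih1).2⟩
          exact (List.pairwise_cons.mp ih1).1
        · simp only [buildRuns, hb, if_true]
          intro r hr
          rcases List.mem_cons.mp hr with rfl | hr
          · exact ⟨hepos, by omega⟩
          · exact ih2 r (by simp [hr])
      · have hgt : v < e := lt_of_le_of_ne hev (fun h => he h.symm)
        constructor
        · simp only [buildRuns, hb, if_neg he]
          refine List.pairwise_cons.mpr ⟨?_, ih1⟩
          intro r hr
          rcases List.mem_cons.mp hr with rfl | hr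
          · exact hgt
          · have := (List.pairwise_cons.mp ih1).1 r hr
            omega
        · simp only [buildRuns, hb, if_neg he]
          intro r hr
          rcases List.mem_cons.mp hr with rfl | hr
          · exact ⟨hepos, le_refl 1⟩
          · exact ih2 r hr
theorem ins_dec {c : Int} : ∀ {rs : List (Int × Int)}, Runs rs →
    insertDesc c (dec rs) = dec (insRun c rs) := by
  intro rs
  induction rs with
  | nil => intro _; rfl
  | cons r t ih =>
    intro h
    have hk : (1:Int) ≤ r.2 := (h.2 r (by simp)).2
    have ht : Runs t := ⟨(List.pairwise_cons.mp h.1).2, fun x hx => h.2 x (by simp [hx])⟩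
    by_cases h1 : r.1 > c
    · simp only [dec, insRun, if_pos h1]
      rw [insertDesc_replicate (by omega : r.1 ≥ c), ih ht]
    · by_cases h2 : r.1 = c
      · subst h2
        simp only [dec, insRun, if_neg h1, if_true]
        rw [insertDesc_replicate (le_refl r.1)]
        have hkey : insertDesc r.1 (dec t) = r.1 :: dec t := by
          apply insertDesc_of_ge
          intro x hx
          obtain ⟨r', hr', he⟩ := mem_dec hx
          have := (List.pairwise_cons.mp h.1).1 r' hr'
          omega
        rw [hkey]
        rw [show (r.2 + 1).toNat = r.2.toNat + 1 by omega, List.replicate_succ']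
        simp
      · have h3 : r.1 < c := by omega
        simp only [dec, insRun, if_neg h1, if_neg h2]
        have hrep : List.replicate r.2.toNat r.1 = r.1 :: List.replicate (r.2.toNat - 1) r.1 := by
          rw [show r.2.toNat = (r.2.toNat - 1) + 1 by omega, List.replicate_succ]
          simp
        rw [hrep]
        simp only [List.cons_append, insertDesc, if_neg (by omega : ¬ r.1 ≥ c)]
        simp

theorem insRun_ne_nil (c : Int) (rs : List (Int × Int)) : insRun c rs ≠ [] := by
  cases rs with
  | nil => simp [insRun]
  | cons r t =>
    by_cases h1 : r.1 > c
    · simp [insRun, h1]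
    · by_cases h2 : r.1 = c <;> simp [insRun, h1, h2]

theorem mem_insRun {c : Int} : ∀ {rs : List (Int × Int)} {r : Int × Int},
    r ∈ insRun c rs → r.1 = c ∨ (∃ r' ∈ rs, r'.1 = r.1) := by
  intro rs
  induction rs with
  | nil => intro r h; simp [insRun] at h; simp [h]
  | cons x t ih =>
    intro r h
    by_cases h1 : x.1 > c
    · simp only [insRun, if_pos h1] at h
      rcases List.mem_cons.mp h with rfl | h
      · exact Or.inr ⟨r, by simp, rfl⟩
      · rcases ih h with h | ⟨r', hr', he⟩
        · exact Or.inl h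
        · exact Or.inr ⟨r', by simp [hr'], he⟩
    · by_cases h2 : x.1 = c
      · simp only [insRun, if_neg h1, if_pos h2] at h
        rcases List.mem_cons.mp h with rfl | h
        · exact Or.inl rfl
        · exact Or.inr ⟨r, by simp [h], rfl⟩
      · simp only [insRun, if_neg h1, if_neg h2] at h
        rcases List.mem_cons.mp h with rfl | h
        · exact Or.inl rfl
        · exact Or.inr ⟨r, by simp [h], rfl⟩

theorem insRun_runs {c : Int} (hc : 0 < c) : ∀ {rs : List (Int × Int)}, Runs rs →
    Runs (insRun c rs) := by
  intro rs
  induction rs with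
  | nil => intro _; exact ⟨by simp [insRun], by simp [insRun, hc]⟩
  | cons r t ih =>
    intro h
    have ht : Runs t := ⟨(List.pairwise_cons.mp h.1).2, fun x hx => h.2 x (by simp [hx])⟩
    have hr := h.2 r (by simp)
    by_cases h1 : r.1 > c
    · simp only [insRun, if_pos h1]
      obtain ⟨p1, p2⟩ := ih ht
      refine ⟨List.pairwise_cons.mpr ⟨?_, p1⟩, ?_⟩
      · intro x hx
        rcases mem_insRun hx with he | ⟨r', hr', he⟩
        · omega
        · have := (List.pairwise_cons.mp h.1).1 r' hr'
          omega
      · intro x hx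
        rcases List.mem_cons.mp hx with rfl | hx
        · exact hr
        · exact p2 x hx
    · by_cases h2 : r.1 = c
      · simp only [insRun, if_neg h1, if_pos h2]
        refine ⟨List.pairwise_cons.mpr ⟨?_, ht.1⟩, ?_⟩
        · intro x hx
          have := (List.pairwise_cons.mp h.1).1 x hx
          omega
        · intro x hx
          rcases List.mem_cons.mp hx with rfl | hx
          · exact ⟨hc, by have := hr.2; omega⟩
          · exact h.2 x (by simp [hx])
      · simp only [insRun, if_neg h1, if_neg h2]
        refine ⟨?_, ?_⟩
        · refine List.pairwise_cons.mpr ⟨?_, h.1⟩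
          intro x hx
          rcases List.mem_cons.mp hx with rfl | hx
          · omega
          · have := (List.pairwise_cons.mp h.1).1 x hx
            omega
        · intro x hx
          rcases List.mem_cons.mp hx with rfl | hx
          · exact ⟨hc, le_refl 1⟩
          · exact h.2 x hx

theorem crossR_spec : ∀ (rs : List (Int × Int)) (rem : Int),
    (∀ r ∈ rs, 0 < r.1 ∧ 1 ≤ r.2) → 0 ≤ rem →
    rem < ((rs.map (fun r => r.1 * r.2)).sum) →
    rs = (crossR rem rs).1 ++ (crossR rem rs).2.2.1 :: (crossR rem rs).2.2.2 ∧
    (crossR rem rs).2.1 = rem - (((crossR rem rs).1.map (fun r => r.1 * r.2)).sum) ∧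
    0 ≤ (crossR rem rs).2.1 ∧
    (crossR rem rs).2.1 < (crossR rem rs).2.2.1.1 * (crossR rem rs).2.2.1.2 := by
  intro rs
  induction rs with
  | nil => intro rem _ h0 hs; simp at hs; omega
  | cons r t ih =>
    intro rem hw h0 hs
    by_cases hc : r.1 * r.2 ≤ rem
    · obtain ⟨i1, i2, i3, i4⟩ := ih (rem - r.1 * r.2)
        (fun x hx => hw x (by simp [hx])) (by omega)
        (by simp [List.sum_cons] at hs ⊢; omega)
      simp only [crossR, if_pos hc]
      refine ⟨?_, ?_, i3, i4⟩
      · conv_lhs => rw [i1]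
        simp
      · simp [i2]; omega
    · simp only [crossR, if_neg hc]
      exact ⟨rfl, by simp, h0, by omega⟩

theorem crossB_skip : ∀ (m : Nat) (v rem : Int) (rest : List Int), 0 < v →
    v * m ≤ rem →
    crossB rem (List.replicate m v ++ rest) =
      (List.replicate m v ++ (crossB (rem - v * m) rest).1, (crossB (rem - v * m) rest).2) := by
  intro m
  induction m with
  | zero => intro v rem rest _ _; simp
  | succ n ih =>
    intro v rem rest hv hle
    have h1 : v ≤ rem := by push_cast at hle; nlinarith
    simp only [List.replicate_succ, List.cons_append, crossB, if_pos h1]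
    rw [ih v (rem - v) rest hv (by push_cast at hle ⊢; linarith)]
    push_cast
    rw [show rem - v * ((n:Int) + 1) = rem - v - v * n by ring]

theorem crossB_cross : ∀ (m : Nat) (v rem : Int) (rest : List Int), 0 < v →
    0 ≤ rem → rem < v * m →
    crossB rem (List.replicate m v ++ rest) =
      (List.replicate (rem / v).toNat v, rem % v, v,
       List.replicate (m - (rem / v).toNat - 1) v ++ rest) := by
  intro m
  induction m with
  | zero => intro v rem rest _ h0 hs; simp at hs; omega
  | succ n ih =>
    intro v rem rest hv h0 hs
    by_cases h1 : v ≤ rem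
    · have hq1 : 1 ≤ rem / v := (Int.le_ediv_iff_mul_le hv).mpr (by omega)
      have hrec := ih v (rem - v) rest hv (by omega) (by push_cast at hs ⊢; nlinarith)
      simp only [List.replicate_succ, List.cons_append, crossB, if_pos h1]
      rw [hrec]
      have he1 : (rem - v) / v = rem / v - 1 := by
        have h := Int.add_mul_ediv_right rem (-1) (by omega : v ≠ 0)
        rw [show rem + -1 * v = rem - v by ring] at h
        omega
      have he2 : (rem - v) % v = rem % v := Int.sub_emod_right rem v
      rw [he1, he2]
      have ht : ((rem / v - 1).toNat) + 1 = (rem / v).toNat := by omega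
      simp only [Prod.mk.injEq, true_and]
      refine ⟨?_, ?_⟩
      · rw [← ht, List.replicate_succ]
      · congr 2
        omega
    · have hq0 : rem / v = 0 := Int.ediv_eq_zero_of_lt h0 (by omega)
      have hp : rem % v = rem := Int.emod_eq_of_lt h0 (by omega)
      simp only [List.replicate_succ, List.cons_append, crossB, if_neg (by omega : ¬ (v ≤ rem))]
      rw [hq0, hp]
      simp

theorem crossB_dec : ∀ (rs : List (Int × Int)) (rem : Int), Runs rs → 0 ≤ rem →
    rem < ((rs.map (fun r => r.1 * r.2)).sum) →
    crossB rem (dec rs) =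
      (dec (crossR rem rs).1 ++
         List.replicate (((crossR rem rs).2.1 / (crossR rem rs).2.2.1.1).toNat)
           (crossR rem rs).2.2.1.1,
       (crossR rem rs).2.1 % (crossR rem rs).2.2.1.1,
       (crossR rem rs).2.2.1.1,
       List.replicate ((crossR rem rs).2.2.1.2.toNat -
           ((crossR rem rs).2.1 / (crossR rem rs).2.2.1.1).toNat - 1)
         (crossR rem rs).2.2.1.1 ++ dec (crossR rem rs).2.2.2) := by
  intro rs
  induction rs with
  | nil => intro rem _ h0 hs; simp at hs; omega
  | cons r t ih =>
    intro rem h h0 hs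
    have hr := h.2 r (by simp)
    have ht : Runs t := ⟨(List.pairwise_cons.mp h.1).2, fun x hx => h.2 x (by simp [hx])⟩
    have hcast : r.1 * ((r.2.toNat : Nat) : Int) = r.1 * r.2 := by
      rw [Int.toNat_of_nonneg (by omega : (0:Int) ≤ r.2)]
    by_cases hc : r.1 * r.2 ≤ rem
    · simp only [dec, crossR, if_pos hc]
      rw [crossB_skip r.2.toNat r.1 rem (dec t) hr.1 (by rw [hcast]; omega)]
      rw [hcast]
      rw [ih (rem - r.1 * r.2) ht (by omega) (by simp [List.sum_cons] at hs ⊢; omega)]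
      simp [dec]
    · simp only [dec, crossR, if_neg hc]
      rw [crossB_cross r.2.toNat r.1 rem (dec t) hr.1 h0 (by rw [hcast]; omega)]
      simp [dec]

theorem dec_reinsert {v m c : Int} {aft : List (Int × Int)} (q k : Nat)
    (hR : Runs ((v, m) :: aft)) (hc : c ≤ v)
    (hqk : q + k + 1 = m.toNat) :
    List.replicate q v ++ insertDesc c (List.replicate k v ++ dec aft) =
      dec (insRun c (if m = 1 then aft else (v, m - 1) :: aft)) := by
  have haft : Runs aft := ⟨(List.pairwise_cons.mp hR.1).2, fun x hx => hR.2 x (by simp [hx])⟩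
  have haftlt : ∀ x ∈ dec aft, x ≤ v := by
    intro x hx
    obtain ⟨r', hr', he⟩ := mem_dec hx
    have := (List.pairwise_cons.mp hR.1).1 r' hr'
    omega
  rw [insertDesc_replicate (by omega : v ≥ c)]
  by_cases hm : m = 1
  · have hq0 : q = 0 := by omega
    have hk0 : k = 0 := by omega
    subst hq0; subst hk0
    simp only [if_pos hm, List.replicate_zero, List.nil_append]
    exact ins_dec haft
  · simp only [if_neg hm]
    by_cases hpc : c = v
    · subst hpc
      rw [insertDesc_of_ge haftlt]
      simp only [insRun, lt_irrefl, if_false, if_true, dec]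
      rw [← List.append_assoc, ← List.replicate_add]
      rw [show List.replicate (q + k) c ++ c :: dec aft =
        (List.replicate (q + k) c ++ [c]) ++ dec aft by simp]
      rw [← List.replicate_succ']
      congr 2
      omega
    · have hlt : c < v := by omega
      simp only [insRun, if_pos (by omega : v > c)]
      simp only [dec]
      rw [← ins_dec haft]
      rw [← List.append_assoc, ← List.replicate_add]
      congr 2
      omega

-- the main bisimulation: reference simulation = B's run-length loop
theorem LtoR : ∀ (fuel : Nat) (X : Int) (runs : List (Int × Int)) (s total time : Int),
    Runs runs → runs ≠ [] → s = ((runs.map (fun r => r.1 * r.2)).sum) →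
    1 ≤ X → total ≤ (fuel : Int) →
    outerL fuel X (dec runs) total time = outerR fuel X runs s total time := by
  intro fuel
  induction fuel with
  | zero => intro _ _ _ _ _ _ _ _ _ _; rfl
  | succ f ih =>
    intro X runs s total time hruns hne hsum hX hfuel
    have hposd : ∀ x ∈ dec runs, 0 < x := dec_pos hruns
    have hsortd : (dec runs).Pairwise (· ≥ ·) := dec_sorted hruns
    have hdsum : (dec runs).sum = ((runs.map (fun r => r.1 * r.2)).sum) :=
      dec_sum runs (fun r h => by have := hruns.2 r h; omega)
    by_cases htot : total > 0
    · by_cases hsX : s ≤ X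
      · have hdne : dec runs ≠ [] := by
          cases runs with
          | nil => exact absurd rfl hne
          | cons r t =>
            intro hcon
            have hr2 := (hruns.2 r (by simp)).2
            have hmem : r.1 ∈ dec (r :: t) := by
              simp only [dec]
              exact List.mem_append.mpr (Or.inl (List.mem_replicate.mpr ⟨by omega, rfl⟩))
            rw [hcon] at hmem
            simp at hmem
        rw [outerL_tail (f + 1) X (dec runs) total time hposd hdne
          (by omega : (dec runs).sum ≤ X) htot hfuel]
        simp only [outerR, if_pos htot, if_pos hsX]
        rw [hdsum, ← hsum]
      · -- a shaping round: X < s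
        subst hsum
        have hXlt : X < (runs.map (fun r => r.1 * r.2)).sum := by omega
        obtain ⟨hdecomp, hrem, hrem0, hremlt⟩ :=
          crossR_spec runs X (fun r h => hruns.2 r h) (by omega) hXlt
        set bef := (crossR X runs).1 with hbef
        set rem' := (crossR X runs).2.1 with hremdef
        set cr := (crossR X runs).2.2.1 with hcrdef
        set aft := (crossR X runs).2.2.2 with haftdef
        have hcrmem : cr ∈ runs := by rw [hdecomp]; simp
        have hcrf := hruns.2 cr hcrmem
        have hv : 0 < cr.1 := hcrf.1
        have hm1 : 1 ≤ cr.2 := hcrf.2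
        set q := (rem' / cr.1).toNat with hqdef
        set p := rem' % cr.1 with hpdef
        set c := cr.1 - p with hcdef
        have hp0 : 0 ≤ p := Int.emod_nonneg _ (by omega)
        have hplt : p < cr.1 := Int.emod_lt_of_pos _ hv
        have hqcast : ((q : Nat) : Int) = rem' / cr.1 := Int.toNat_of_nonneg (Int.ediv_nonneg hrem0 (by omega))
        have hqm : ((q : Nat) : Int) < cr.2 := by
          rw [hqcast]
          exact (Int.ediv_lt_iff_lt_mul hv).mpr (by nlinarith)
        set k := cr.2.toNat - q - 1 with hkdef
        have hqk : q + k + 1 = cr.2.toNat := by omega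
        -- the run-list invariants, split across the crossR decomposition
        have hsplit : ((bef ++ cr :: aft).Pairwise (fun a b => a.1 > b.1)) ∧
            ∀ r ∈ bef ++ cr :: aft, 0 < r.1 ∧ 1 ≤ r.2 := by
          constructor
          · rw [← hdecomp]; exact hruns.1
          · rw [← hdecomp]; exact hruns.2
        have hbefS := (List.pairwise_append.mp hsplit.1).1
        have hcrS := (List.pairwise_append.mp hsplit.1).2.1
        have hcross := (List.pairwise_append.mp hsplit.1).2.2
        have hRcr : Runs (cr :: aft) :=
          ⟨hcrS, fun r hr => hsplit.2 r (by simp [hr])⟩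
        -- B's next run list
        set tail := if cr.2 = 1 then aft else (cr.1, cr.2 - 1) :: aft with htaildef
        have hRtail : Runs tail := by
          rw [htaildef]
          by_cases hone : cr.2 = 1
          · simp only [if_pos hone]
            exact ⟨(List.pairwise_cons.mp hcrS).2, fun x hx => hRcr.2 x (by simp [hx])⟩
          · simp only [if_neg hone]
            refine ⟨List.pairwise_cons.mpr ⟨(List.pairwise_cons.mp hcrS).1, (List.pairwise_cons.mp hcrS).2⟩, ?_⟩
            intro r hr
            rcases List.mem_cons.mp hr with rfl | hr
            · exact ⟨hv, by omega⟩
            · exact hRcr.2 r (by simp [hr])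
        have htailvals : ∀ r ∈ tail, r.1 ≤ cr.1 := by
          intro r hr
          rw [htaildef] at hr
          by_cases hone : cr.2 = 1
          · rw [if_pos hone] at hr
            have := (List.pairwise_cons.mp hcrS).1 r hr
            omega
          · rw [if_neg hone] at hr
            rcases List.mem_cons.mp hr with rfl | hr
            · exact le_refl _
            · have := (List.pairwise_cons.mp hcrS).1 r hr
              omega
        have hcpos : 0 < c := by omega
        have hRnew : Runs (bef ++ insRun c tail) := by
          obtain ⟨i1, i2⟩ := insRun_runs hcpos hRtail
          constructor
          · rw [List.pairwise_append]
            refine ⟨hbefS, i1, ?_⟩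
            intro a ha b hb
            have haval : cr.1 < a.1 := by
              have := hcross a ha cr (by simp)
              omega
            rcases mem_insRun hb with he | ⟨r', hr', he⟩
            · omega
            · have := htailvals r' hr'
              omega
          · intro r hr
            rcases List.mem_append.mp hr with hr | hr
            · exact hsplit.2 r (by simp [hr])
            · exact i2 r hr
        -- the decoded next list is exactly A's next list
        have hcb := crossB_dec runs X hruns (by omega) hXlt
        rw [← hbef, ← hremdef, ← hcrdef, ← haftdef, ← hqdef, ← hpdef] at hcb
        have hdd : dec runs = (dec bef ++ List.replicate q cr.1) ++ cr.1 ::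
            (List.replicate k cr.1 ++ dec aft) := by
          conv_lhs => rw [hdecomp]
          rw [dec_append]
          simp only [dec]
          rw [show cr.2.toNat = q + (1 + k) by omega]
          rw [List.replicate_add, List.replicate_add]
          simp
        have hLsum : X < (dec runs).sum := by
          rw [dec_sum runs (fun r h => by have := hruns.2 r h; omega)]
          exact hXlt
        simp only [outerL, outerR, if_pos htot, if_neg hsX]
        rw [roundL_cross (dec runs) X [] total (dec_sorted hruns) (dec_pos hruns)
          (by omega) hLsum]
        rw [hcb]
        simp only [List.nil_append]
        have hmod : PySem.Int.mod rem' cr.1 = p := by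
          rw [PySem.Int.mod_eq_emod_of_pos hv]
        rw [← hremdef, ← hcrdef]
        rw [hmod, ← hcdef, ← htaildef]
        have hkk : cr.2.toNat - q - 1 = k := rfl
        rw [hkk]
        have hdecnew : dec (bef ++ insRun c tail) =
            (dec bef ++ List.replicate q cr.1) ++
              insertDesc c (List.replicate k cr.1 ++ dec aft) := by
          rw [dec_append]
          rw [← dec_reinsert q k hRcr (by rw [hcdef]; linarith [hp0]) hqk]
          simp only [List.append_assoc]
          rfl
        have hsumnew : (runs.map (fun r => r.1 * r.2)).sum - p =
            ((bef ++ insRun c tail).map (fun r => r.1 * r.2)).sum := by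
          rw [← dec_sum runs (fun r h => by have := hruns.2 r h; omega),
            ← dec_sum (bef ++ insRun c tail) (fun r h => by have := hRnew.2 r h; omega)]
          rw [hdecnew, hdd]
          simp only [List.sum_append, List.sum_cons, List.sum_replicate, nsmul_eq_mul,
            insertDesc_sum]
          ring_nf
          omega
        rw [← hdecnew]
        apply ih X (bef ++ insRun c tail) _ (total - X) (time + 1) hRnew
        · intro hnil
          exact insRun_ne_nil c tail (List.append_eq_nil_iff.mp hnil).2
        · exact hsumnew
        · exact hX
        · push_cast at hfuel ⊢; omega
    · rw [outerL_nonpos htot]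
      cases f with
      | zero => simp [outerR, htot]
      | succ f' => simp [outerR, htot]

-- ===== VERDICT (by name: the statement is the Claim_ definition above) =====
theorem min_time_to_view_spec : Claim_equal_min_time_to_view := by
  intro N X exhibits _ hpre
  unfold Spec_min_time_to_view min_time_to_view min_time_to_view_alt
  have hAL : outerA ((X * N).toNat + 1) X (exhibits.map (fun e => -e)) (X * N) 0 =
      outerL ((X * N).toNat + 1) X
        (PySem.List.sorted (exhibits.filter (fun e => decide (0 < e))) (fun x => x) true)
        (X * N) 0 := by
    apply outer_sim
    · rw [init_posOf]
      exact PySem.List.sorted_perm _ _ _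
    · have := PySem.List.sorted_pairwise_rev (exhibits.filter (fun e => decide (0 < e))) (fun x => x)
      exact this.imp (by intro a b h; exact h)
  rw [hAL]
  simp only []
  by_cases ht : X * N ≤ 0
  · simp [outerL, outerR, show ¬ X * N > 0 by omega]
  · obtain ⟨hX, e, he, hepos⟩ := hpre.resolve_left ht
    have hsorted : (PySem.List.sorted (exhibits.filter (fun e => decide (0 < e)))
        (fun x => x) true).Pairwise (· ≥ ·) := by
      have := PySem.List.sorted_pairwise_rev (exhibits.filter (fun e => decide (0 < e))) (fun x => x)
      exact this.imp (by intro a b h; exact h)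
    have hposall : ∀ c ∈ PySem.List.sorted (exhibits.filter (fun e => decide (0 < e)))
        (fun x => x) true, 0 < c := by
      intro c hc
      have := (PySem.List.sorted_perm (exhibits.filter (fun e => decide (0 < e)))
        (fun x => x) true).mem_iff.mp hc
      simp [List.mem_filter] at this
      exact this.2
    conv_lhs => rw [← dec_buildRuns (PySem.List.sorted (exhibits.filter (fun e => decide (0 < e)))
      (fun x => x) true)]
    apply LtoR
    · exact runs_buildRuns hsorted hposall
    · intro hnil
      have hmem : e ∈ PySem.List.sorted (exhibits.filter (fun e => decide (0 < e))) (fun x => x) true :=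
        (PySem.List.sorted_perm _ _ _).symm.mem_iff.mp
          (by simp [List.mem_filter]; exact ⟨he, hepos⟩)
      rw [buildRuns_eq_nil hnil] at hmem
      simp at hmem
    · rfl
    · omega
    · omega
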